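-- pv_equiv track=rewrite | github.com/eldala07/advent-of-code-2024 | day09.py | is_valid_filesystem
-- ===== SOURCE A (Python) =====
-- def is_valid_filesystem(filesystem):
--     is_valid = True
--     nb_gaps = 0
--     for bf in filesystem:
--         if bf == -1:
--             if nb_gaps >= 1:
--                 is_valid = False
--                 break
--         elif bf != -1:
--             nb_gaps += 1
--
--     return is_valid
-- ===== SOURCE B (Python) =====
-- def is_valid_filesystem(filesystem):
--     first = next((i for i, bf in enumerate(filesystem) if bf != -1), None)
--     if first is None:
--         return True
--     return -1 not in filesystem[first:]
-- ===== Notes on version B (the rewrite author's own statement) =====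
-- stated objective: simpler
-- what changed: Replaces A's flag-and-counter scan with break by a two-step decomposition: find the index of the first file block, then a membership test for -1 on the suffix from that index.
import Mathlib
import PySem

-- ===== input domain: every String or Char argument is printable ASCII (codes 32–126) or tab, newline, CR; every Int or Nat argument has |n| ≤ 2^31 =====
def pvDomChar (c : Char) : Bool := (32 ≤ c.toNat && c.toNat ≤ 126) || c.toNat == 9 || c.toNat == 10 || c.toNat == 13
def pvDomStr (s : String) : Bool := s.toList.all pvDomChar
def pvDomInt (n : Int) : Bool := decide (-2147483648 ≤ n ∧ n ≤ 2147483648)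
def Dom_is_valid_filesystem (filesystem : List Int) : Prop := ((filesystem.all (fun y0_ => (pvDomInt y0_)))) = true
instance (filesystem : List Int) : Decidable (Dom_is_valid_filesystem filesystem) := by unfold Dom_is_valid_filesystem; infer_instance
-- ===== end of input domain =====

-- B: find the first file-block index, then a suffix membership test (simpler decomposition, same cost).


-- ===== PORT A =====
def is_valid_filesystem.loop (fs : List Int) (is_valid : Bool) (nb_gaps : Int) : Bool :=
  match fs with
  | [] => is_valid
  | bf :: rest =>
    if bf == -1 then
      if nb_gaps ≥ 1 then false  -- is_valid = False; break
      else is_valid_filesystem.loop rest is_valid nb_gaps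
    else  -- elif bf != -1 (always true here)
      is_valid_filesystem.loop rest is_valid (nb_gaps + 1)

def is_valid_filesystem (filesystem : List Int) : Bool :=
  is_valid_filesystem.loop filesystem true 0

-- ===== PORT B =====
-- first = next((i for i, bf in enumerate(filesystem) if bf != -1), None); enumerate index is a Nat
def is_valid_filesystem_alt.firstFile (fs : List Int) (i : Nat) : Option Nat :=
  match fs with
  | [] => none
  | bf :: rest => if bf != -1 then some i else is_valid_filesystem_alt.firstFile rest (i + 1)

def is_valid_filesystem_alt (filesystem : List Int) : Bool :=
  match is_valid_filesystem_alt.firstFile filesystem 0 with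
  | none => true
  | some first => !((filesystem.drop first).contains (-1))  -- -1 not in filesystem[first:] (first ≥ 0)

-- ===== PRECONDITION & SPEC =====
def Spec_is_valid_filesystem (filesystem : List Int) (out : Bool) : Prop := out = is_valid_filesystem_alt filesystem
instance (filesystem : List Int) (out : Bool) : Decidable (Spec_is_valid_filesystem filesystem out) := by unfold Spec_is_valid_filesystem; infer_instance

-- ===== CLAIM (what is proved, stated in full; the proofs are below) =====
def Claim_equal_is_valid_filesystem : Prop := ∀ (filesystem : List Int), Dom_is_valid_filesystem filesystem → Spec_is_valid_filesystem filesystem (is_valid_filesystem filesystem)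

-- ===== LEMMAS AND PROOFS =====
-- once nb_gaps ≥ 1, A's loop just checks the remaining list for a gap
lemma loopA_pos (fs : List Int) (g : Int) (hg : 1 ≤ g) :
    is_valid_filesystem.loop fs true g = !(fs.contains (-1)) := by
  induction fs generalizing g with
  | nil => simp [is_valid_filesystem.loop]
  | cons bf rest ih =>
    by_cases h : bf = -1
    · simp [is_valid_filesystem.loop, h, hg]
    · rw [is_valid_filesystem.loop, if_neg (by simp [h]), ih (g + 1) (by omega)]
      simp [List.contains_cons, Ne.symm h]

-- enumerate's running index shifts the found index by one
lemma firstFile_succ (l : List Int) (i : Nat) :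
    is_valid_filesystem_alt.firstFile l (i + 1)
      = (is_valid_filesystem_alt.firstFile l i).map (· + 1) := by
  induction l generalizing i with
  | nil => simp [is_valid_filesystem_alt.firstFile]
  | cons x xs ihx =>
    by_cases hx : x = -1
    · simp [is_valid_filesystem_alt.firstFile, hx, ihx]
    · simp [is_valid_filesystem_alt.firstFile, hx]

lemma loop_eq_alt (fs : List Int) :
    is_valid_filesystem.loop fs true 0 = is_valid_filesystem_alt fs := by
  induction fs with
  | nil => simp [is_valid_filesystem.loop, is_valid_filesystem_alt, is_valid_filesystem_alt.firstFile]
  | cons bf rest ih =>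
    by_cases h : bf = -1
    · -- leading gap: A's loop ignores it (nb_gaps = 0); B's first-file search skips it
      have hl : is_valid_filesystem.loop (bf :: rest) true 0
          = is_valid_filesystem.loop rest true 0 := by
        simp [is_valid_filesystem.loop, h]
      rw [hl, ih]
      unfold is_valid_filesystem_alt
      rw [is_valid_filesystem_alt.firstFile, if_neg (by simp [h]), firstFile_succ]
      cases is_valid_filesystem_alt.firstFile rest 0 with
      | none => simp
      | some i => simp [List.drop_succ_cons]
    · -- bf is the first file block: both sides reduce to "no -1 in rest"
      have hl : is_valid_filesystem.loop (bf :: rest) true 0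
          = is_valid_filesystem.loop rest true 1 := by
        simp [is_valid_filesystem.loop, h]
      rw [hl, loopA_pos rest 1 le_rfl]
      unfold is_valid_filesystem_alt
      rw [is_valid_filesystem_alt.firstFile, if_pos (by simp [h])]
      simp only [List.contains_cons, Bool.or_eq_true, beq_iff_eq, decide_eq_true_eq]
      by_cases hr : rest.contains (-1) <;> simp [hr, Ne.symm h, List.contains_cons]

-- ===== VERDICT (by name: the statement is the Claim_ definition above) =====
theorem is_valid_filesystem_spec : Claim_equal_is_valid_filesystem := by
  intro fs _
  unfold Spec_is_valid_filesystem is_valid_filesystem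
  exact loop_eq_alt fs
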